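-- pv_equiv track=rewrite | github.com/yang-jeongman/studysnap-samples | learning_data/church_bulletin/template_validator.py | suggest_fixes
-- ===== SOURCE A (Python) =====
-- from typing import Dict, List, Tuple
--
-- def suggest_fixes(validation_result: Dict) -> List[str]:
--     """
--     검증 실패 시 수정 제안
--
--     Args:
--         validation_result: validate_html() 또는 validate_data() 결과
--
--     Returns:
--         수정 제안 목록
--     """
--     suggestions = []
--
--     for error in validation_result.get("errors", []):
--         if "sermon_word_content" in error:
--             suggestions.append("설교 본문(생명의 말씀)을 추가하세요. PDF 4페이지에서 추출 가능합니다.")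
--
--         elif "worship_services" in error or "service_schedule" in error:
--             suggestions.append("예배 정보(사회자, 대표기도 등)를 추가하세요. PDF 2페이지 표에서 추출 가능합니다.")
--
--         elif "devotional_content" in error:
--             suggestions.append("오늘의 양식 본문을 추가하세요. PDF 6페이지에서 추출 가능합니다.")
--
--         elif "choir_schedule" in error:
--             suggestions.append("금주의 찬양 정보를 추가하세요. PDF 3페이지 표에서 추출 가능합니다.")
--
--     return suggestions
-- ===== SOURCE B (Python) =====
-- KEYWORD_PRIORITY = {
--     "sermon_word_content": 0,
--     "worship_services": 1,
--     "service_schedule": 1,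
--     "devotional_content": 2,
--     "choir_schedule": 3,
-- }
--
-- MESSAGES = [
--     "설교 본문(생명의 말씀)을 추가하세요. PDF 4페이지에서 추출 가능합니다.",
--     "예배 정보(사회자, 대표기도 등)를 추가하세요. PDF 2페이지 표에서 추출 가능합니다.",
--     "오늘의 양식 본문을 추가하세요. PDF 6페이지에서 추출 가능합니다.",
--     "금주의 찬양 정보를 추가하세요. PDF 3페이지 표에서 추출 가능합니다.",
-- ]
--
-- def suggest_fixes(validation_result):
--     # For each error, collect the priorities of ALL keywords found in it and
--     # emit the message of the highest-priority (smallest-numbered) match.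
--     out = []
--     for error in validation_result.get("errors", []):
--         hits = [p for k, p in KEYWORD_PRIORITY.items() if k in error]
--         if hits:
--             out.append(MESSAGES[min(hits)])
--     return out
-- ===== Notes on version B (the rewrite author's own statement) =====
-- stated objective: alternative
-- what changed: Instead of A's first-match elif chain per error, B collects the priorities of ALL keywords occurring in the error via a keyword->priority map and emits the message of the minimum priority, correct because the elif order coincides with ascending priority.
import Mathlib
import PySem

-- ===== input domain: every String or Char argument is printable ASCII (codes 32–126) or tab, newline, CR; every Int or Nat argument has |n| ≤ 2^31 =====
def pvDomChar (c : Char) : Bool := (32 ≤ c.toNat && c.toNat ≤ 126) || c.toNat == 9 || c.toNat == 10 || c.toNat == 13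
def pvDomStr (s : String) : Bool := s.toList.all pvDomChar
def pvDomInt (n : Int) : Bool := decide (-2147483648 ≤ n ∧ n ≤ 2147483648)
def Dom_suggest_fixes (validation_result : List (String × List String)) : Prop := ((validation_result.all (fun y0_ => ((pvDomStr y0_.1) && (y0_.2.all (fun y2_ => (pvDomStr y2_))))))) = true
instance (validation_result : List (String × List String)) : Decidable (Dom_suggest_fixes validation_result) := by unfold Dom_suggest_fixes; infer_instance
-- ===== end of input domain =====

-- ===== PORT A =====
def suggest_fixes (validation_result : List (String × List String)) : List String :=
  (PySem.Dict.getD (PySem.Dict.mk validation_result) "errors" []).foldl (fun suggestions error =>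
    if PySem.Str.isIn "sermon_word_content" error then
      suggestions ++ ["설교 본문(생명의 말씀)을 추가하세요. PDF 4페이지에서 추출 가능합니다."]
    else if PySem.Str.isIn "worship_services" error || PySem.Str.isIn "service_schedule" error then
      suggestions ++ ["예배 정보(사회자, 대표기도 등)를 추가하세요. PDF 2페이지 표에서 추출 가능합니다."]
    else if PySem.Str.isIn "devotional_content" error then
      suggestions ++ ["오늘의 양식 본문을 추가하세요. PDF 6페이지에서 추출 가능합니다."]
    else if PySem.Str.isIn "choir_schedule" error then
      suggestions ++ ["금주의 찬양 정보를 추가하세요. PDF 3페이지 표에서 추출 가능합니다."]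
    else suggestions) []

-- ===== PORT B =====
-- B: per error, collect priorities of ALL matching keywords and emit the message
-- of the minimum priority (objective: alternative decomposition); same values everywhere.
def pvKeywordPriority : List (String × Int) :=
  [("sermon_word_content", 0), ("worship_services", 1), ("service_schedule", 1),
   ("devotional_content", 2), ("choir_schedule", 3)]

def pvMessages : List String :=
  ["설교 본문(생명의 말씀)을 추가하세요. PDF 4페이지에서 추출 가능합니다.",
   "예배 정보(사회자, 대표기도 등)를 추가하세요. PDF 2페이지 표에서 추출 가능합니다.",
   "오늘의 양식 본문을 추가하세요. PDF 6페이지에서 추출 가능합니다.",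
   "금주의 찬양 정보를 추가하세요. PDF 3페이지 표에서 추출 가능합니다."]

-- one iteration of Source B's loop body
def pvStep (out : List String) (error : String) : List String :=
  let hits := ((PySem.Dict.mk pvKeywordPriority).items.filter
                (fun kp => PySem.Str.isIn kp.1 error)).map Prod.snd
  match PySem.List.min? hits (fun p => p) with
  | none => out
  | some p =>
    match PySem.List.pyGet? pvMessages p with
    | some m => out ++ [m]
    | none => out

def suggest_fixes_alt (validation_result : List (String × List String)) : List String :=
  (PySem.Dict.getD (PySem.Dict.mk validation_result) "errors" []).foldl pvStep []

-- ===== PRECONDITION & SPEC =====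
def Spec_suggest_fixes (validation_result : List (String × List String)) (out : List String) : Prop := out = suggest_fixes_alt validation_result
instance (validation_result : List (String × List String)) (out : List String) : Decidable (Spec_suggest_fixes validation_result out) := by unfold Spec_suggest_fixes; infer_instance

-- ===== CLAIM (what is proved, stated in full; the proofs are below) =====
def Claim_equal_suggest_fixes : Prop := ∀ (validation_result : List (String × List String)), Dom_suggest_fixes validation_result → Spec_suggest_fixes validation_result (suggest_fixes validation_result)

-- ===== LEMMAS AND PROOFS =====
lemma step_eq (out : List String) (error : String) :
    pvStep out error =
    (if PySem.Str.isIn "sermon_word_content" error then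
      out ++ ["설교 본문(생명의 말씀)을 추가하세요. PDF 4페이지에서 추출 가능합니다."]
    else if PySem.Str.isIn "worship_services" error || PySem.Str.isIn "service_schedule" error then
      out ++ ["예배 정보(사회자, 대표기도 등)를 추가하세요. PDF 2페이지 표에서 추출 가능합니다."]
    else if PySem.Str.isIn "devotional_content" error then
      out ++ ["오늘의 양식 본문을 추가하세요. PDF 6페이지에서 추출 가능합니다."]
    else if PySem.Str.isIn "choir_schedule" error then
      out ++ ["금주의 찬양 정보를 추가하세요. PDF 3페이지 표에서 추출 가능합니다."]
    else out) := by
  by_cases h1 : PySem.Str.isIn "sermon_word_content" error <;>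
  by_cases h2 : PySem.Str.isIn "worship_services" error <;>
  by_cases h3 : PySem.Str.isIn "service_schedule" error <;>
  by_cases h4 : PySem.Str.isIn "devotional_content" error <;>
  by_cases h5 : PySem.Str.isIn "choir_schedule" error <;>
  simp [PySem.Str.isIn] at h1 h2 h3 h4 h5 <;>
  simp [pvStep, pvKeywordPriority, List.filter,
        PySem.Str.isIn, h1, h2, h3, h4, h5, PySem.List.min?, PySem.List.pyGet?, PySem.List.pyIdx?, pvMessages]

-- ===== VERDICT (by name: the statement is the Claim_ definition above) =====
theorem suggest_fixes_spec : Claim_equal_suggest_fixes := by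
  intro vr _
  unfold Spec_suggest_fixes suggest_fixes suggest_fixes_alt
  simp only [← step_eq]
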